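-- pv_equiv track=rewrite | github.com/GTU-Contributions/CSE321_AlgorithmDesign | AlternatingDisks.py | CreateDisks
-- ===== SOURCE A (Python) =====
-- def CreateDisks(size):
--     Disks = []
--     for i in range(1, (2*size+1)):
--         if i%2 != 0:
--             Disks.append("1") # Append 1 for black disk
--         else:
--             Disks.append("0") # Append 0 for white disk
--
--     return Disks
-- ===== SOURCE B (Python) =====
-- def CreateDisks(size):
--     return ["1", "0"] * size
-- ===== Notes on version B (the rewrite author's own statement) =====
-- stated objective: simpler
-- what changed: Replaces the indexed loop with an i%2 parity branch by list repetition of the pattern ["1","0"] size times.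
import Mathlib
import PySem

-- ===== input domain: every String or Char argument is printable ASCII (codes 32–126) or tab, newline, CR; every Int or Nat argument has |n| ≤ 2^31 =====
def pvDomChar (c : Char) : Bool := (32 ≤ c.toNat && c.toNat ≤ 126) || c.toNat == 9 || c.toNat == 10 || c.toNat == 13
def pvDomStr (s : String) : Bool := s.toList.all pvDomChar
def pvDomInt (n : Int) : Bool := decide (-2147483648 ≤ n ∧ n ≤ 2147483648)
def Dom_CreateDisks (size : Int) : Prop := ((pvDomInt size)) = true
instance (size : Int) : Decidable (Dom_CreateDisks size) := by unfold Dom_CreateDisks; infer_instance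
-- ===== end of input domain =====

-- B replaces the indexed loop with its parity branch by repeating the two-element pattern ["1","0"] size times (simpler).

-- ===== PORT A =====
def CreateDisks (size : Int) : List String :=
  (PySem.List.pyRange 1 (2*size+1) 1).foldl
    (fun disks i => if i % 2 != 0 then disks ++ ["1"] else disks ++ ["0"]) []

-- ===== PORT B =====
def CreateDisks_alt (size : Int) : List String :=
  (List.replicate size.toNat ["1", "0"]).flatten

-- ===== PRECONDITION & SPEC =====
def Spec_CreateDisks (size : Int) (out : List String) : Prop := out = CreateDisks_alt size
instance (size : Int) (out : List String) : Decidable (Spec_CreateDisks size out) := by unfold Spec_CreateDisks; infer_instance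

-- ===== CLAIM (what is proved, stated in full; the proofs are below) =====
def Claim_equal_CreateDisks : Prop := ∀ (size : Int), Dom_CreateDisks size → Spec_CreateDisks size (CreateDisks size)

-- ===== LEMMAS AND PROOFS =====

theorem pvDisks_nat (n : Nat) :
    (PySem.List.pyRange 1 (2*(n:Int)+1) 1).foldl
      (fun disks i => if i % 2 != 0 then disks ++ ["1"] else disks ++ ["0"]) []
    = (List.replicate n ["1", "0"]).flatten := by
  induction n with
  | zero => decide
  | succ k ih =>
    have h1 : (2*((k:Int)+1)+1) = (2*(k:Int)+1) + 1 + 1 := by ring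
    rw [show ((k+1 : Nat) : Int) = (k:Int)+1 by push_cast; ring, h1,
        PySem.List.pyRange_one_succ_right (by omega),
        PySem.List.pyRange_one_succ_right (by omega),
        List.foldl_append, List.foldl_append, ih]
    have hodd : (2*(k:Int)+1) % 2 = 1 := by omega
    have heven : (2*(k:Int)+1+1) % 2 = 0 := by omega
    simp [hodd, heven, List.replicate_succ' (n := k)]

theorem CreateDisks_spec : Claim_equal_CreateDisks := by
  intro size _
  unfold Spec_CreateDisks CreateDisks CreateDisks_alt
  by_cases h : size ≤ 0
  · rw [show size.toNat = 0 by omega, PySem.List.pyRange_one,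
        show (2*size+1-1).toNat = 0 by omega]
    simp
  · have := pvDisks_nat size.toNat
    rwa [show ((size.toNat : Int)) = size by omega] at this
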